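-- pv_equiv track=rewrite | github.com/artemious7/TddKatas | DiversionPy/Diversion.py | proof_step2
-- ===== SOURCE A (Python) =====
-- def proof_step2(sequenceLength: int):
--
--     def permutations(sequenceLength: int):
--         if sequenceLength == 0:
--             return [""]
--         if sequenceLength == 1:
--             return ["0", "1"]
--
--         return [("0" + x) for x in permutations(sequenceLength - 1)] + [
--             ("1" + x) for x in permutations(sequenceLength - 2)
--         ]
--
--     return len(permutations(sequenceLength))
-- ===== SOURCE B (Python) =====
-- def proof_step2(sequenceLength: int):
--     if sequenceLength == 0:
--         return 1
--     a, b = 1, 2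
--     for _ in range(sequenceLength - 1):
--         a, b = b, a + b
--     return b
-- ===== Notes on version B (the rewrite author's own statement) =====
-- stated objective: faster
-- what changed: replaces the exponential recursion that materialises every binary string with an O(n) iterative Fibonacci-style counter holding two integers
import Mathlib
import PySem

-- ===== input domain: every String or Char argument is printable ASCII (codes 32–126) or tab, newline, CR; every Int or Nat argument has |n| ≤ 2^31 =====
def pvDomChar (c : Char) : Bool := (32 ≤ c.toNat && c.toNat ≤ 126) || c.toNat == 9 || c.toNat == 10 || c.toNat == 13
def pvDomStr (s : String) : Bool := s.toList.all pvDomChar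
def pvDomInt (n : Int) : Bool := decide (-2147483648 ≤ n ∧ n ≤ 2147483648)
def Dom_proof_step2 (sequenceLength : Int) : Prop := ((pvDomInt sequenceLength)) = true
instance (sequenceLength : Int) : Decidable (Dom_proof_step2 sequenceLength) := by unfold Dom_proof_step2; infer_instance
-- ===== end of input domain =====

-- B replaces A's exponential recursion that builds every binary string with an O(n)
-- iterative two-variable Fibonacci-style counter (asymptotically faster).


-- ===== PORT A =====
-- A's inner 'permutations' recursion; on Pre_ (0 ≤ n) the Python value is n.toNat-indexed,
-- so the helper recurses on Nat (the Python diverges on negative input, excluded by Pre_).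
def pvPermutations : Nat → List String
  | 0 => [""]
  | 1 => ["0", "1"]
  | (n+2) => (pvPermutations (n+1)).map (fun x => "0" ++ x)
             ++ (pvPermutations n).map (fun x => "1" ++ x)

def proof_step2 (sequenceLength : Int) : Int :=
  ((pvPermutations sequenceLength.toNat).length : Int)

-- ===== PORT B =====
def proof_step2_alt (sequenceLength : Int) : Int :=
  if sequenceLength == 0 then 1
  else
    (((PySem.List.pyRange 0 (sequenceLength - 1) 1).foldl
        (fun (p : Int × Int) _ => (p.2, p.1 + p.2)) (1, 2)).2)

-- ===== PRECONDITION & SPEC =====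
-- Pre_ excludes negative lengths, on which A's recursion never reaches a base case and
-- Python raises RecursionError.
def Pre_proof_step2 (sequenceLength : Int) : Prop := 0 ≤ sequenceLength
instance (sequenceLength : Int) : Decidable (Pre_proof_step2 sequenceLength) := by
  unfold Pre_proof_step2; infer_instance
def pvWitness_proof_step2 : Int := (5)

def Spec_proof_step2 (sequenceLength : Int) (out : Int) : Prop := out = proof_step2_alt sequenceLength
instance (sequenceLength : Int) (out : Int) : Decidable (Spec_proof_step2 sequenceLength out) := by unfold Spec_proof_step2; infer_instance

-- ===== CLAIM (what is proved, stated in full; the proofs are below) =====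
def Claim_equal_proof_step2 : Prop := ∀ (sequenceLength : Int), Dom_proof_step2 sequenceLength → Pre_proof_step2 sequenceLength → Spec_proof_step2 sequenceLength (proof_step2 sequenceLength)

-- ===== LEMMAS AND PROOFS =====
def pvL (n : Nat) : Int := ((pvPermutations n).length : Int)

theorem pvL_zero : pvL 0 = 1 := by simp [pvL, pvPermutations]

theorem pvL_one : pvL 1 = 2 := by simp [pvL, pvPermutations]

theorem pvL_rec (n : Nat) : pvL (n + 2) = pvL (n + 1) + pvL n := by
  simp [pvL, pvPermutations]

theorem pvLoop_range (k : Nat) :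
    (List.range k).foldl (fun (p : Int × Int) (_ : Nat) => (p.2, p.1 + p.2)) (1, 2)
      = (pvL k, pvL (k + 1)) := by
  induction k with
  | zero => simp [pvL_zero, pvL_one]
  | succ k ih =>
      rw [List.range_succ, List.foldl_append, ih]
      simp [pvL_rec k]; ring

theorem proof_step2_spec : Claim_equal_proof_step2 := by
  intro n _ hpre
  unfold Spec_proof_step2 proof_step2 proof_step2_alt
  by_cases h0 : n = 0
  · subst h0; simp [pvPermutations]
  · have hne : (n == 0) = false := by simpa using h0
    rw [hne]
    simp only [Bool.false_eq_true, if_false]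
    rw [PySem.List.pyRange_one]
    rw [List.foldl_map]
    have hfold :
        (List.range (n - 1 - 0).toNat).foldl
            (fun (p : Int × Int) (_ : Nat) => (p.2, p.1 + p.2)) (1, 2)
          = (pvL (n - 1 - 0).toNat, pvL ((n - 1 - 0).toNat + 1)) := pvLoop_range _
    rw [hfold]
    have h1 : 1 ≤ n := by unfold Pre_proof_step2 at hpre; omega
    have : (n - 1 - 0).toNat + 1 = n.toNat := by omega
    rw [this]
    rfl
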